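-- pv_equiv track=rewrite | github.com/Peterstangolis/lottery_tracking_dashboard | lottery_analysis.py | over_under
-- ===== SOURCE A (Python) =====
-- def over_under(l):
--     over_under_35 = {
--         "over_35": 0,
--         "under_35": 0
--     }
--
--     for n in l:
--         if n > 34:
--             over_under_35["over_35"] += 1
--         else:
--             over_under_35["under_35"] += 1
--
--     return over_under_35
-- ===== SOURCE B (Python) =====
-- def over_under(l):
--     # Sort, then binary-search the partition point between <=34 and >34.
--     s = sorted(l)
--     lo, hi = 0, len(s)
--     while lo < hi:
--         mid = (lo + hi) // 2
--         if s[mid] > 34: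
--             hi = mid
--         else:
--             lo = mid + 1
--     return {"over_35": len(s) - lo, "under_35": lo}
-- ===== Notes on version B (the rewrite author's own statement) =====
-- stated objective: alternative
-- what changed: Instead of one linear pass incrementing two dict counters, B sorts the list and binary-searches the partition index between values <=34 and >34, deriving both bucket sizes arithmetically from that index.
import Mathlib
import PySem

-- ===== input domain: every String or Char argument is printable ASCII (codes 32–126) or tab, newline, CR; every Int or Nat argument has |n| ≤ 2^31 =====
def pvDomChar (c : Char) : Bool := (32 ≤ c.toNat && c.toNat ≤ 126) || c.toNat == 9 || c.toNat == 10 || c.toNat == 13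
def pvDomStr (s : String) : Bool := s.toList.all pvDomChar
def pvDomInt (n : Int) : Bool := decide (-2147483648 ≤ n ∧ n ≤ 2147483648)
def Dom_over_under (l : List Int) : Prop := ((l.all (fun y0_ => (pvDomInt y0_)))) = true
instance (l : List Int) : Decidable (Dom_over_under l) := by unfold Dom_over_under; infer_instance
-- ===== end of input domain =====

-- B replaces A's single linear pass with two counters by: sort the list, binary-search the
-- partition index between <=34 and >34, and derive both bucket sizes from that index ('alternative').
-- ===== PORT A =====
def over_under (l : List Int) : List (String × Int) :=
  (l.foldl (fun d n =>
    if n > 34 then PySem.Dict.modify d "over_35" 0 (fun v => v + 1)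
    else PySem.Dict.modify d "under_35" 0 (fun v => v + 1))
    (PySem.Dict.insert (PySem.Dict.insert (PySem.Dict.empty : PySem.Dict String Int) "over_35" 0) "under_35" 0)).items

-- ===== PORT B =====
-- the while-loop of Source B: lo, hi with mid = (lo+hi)//2; s[mid] is always in range
-- when lo < hi ≤ len s (so getD's default is never used).
def ouBis (s : List Int) (lo hi : Nat) : Nat :=
  if lo < hi then
    let mid := (lo + hi) / 2
    if s.getD mid 0 > 34 then ouBis s lo mid else ouBis s (mid + 1) hi
  else lo
termination_by hi - lo
decreasing_by all_goals omega

def over_under_alt (l : List Int) : List (String × Int) :=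
  let s := PySem.List.sorted l (fun x => x) false
  let lo := ouBis s 0 s.length
  [("over_35", (s.length : Int) - (lo : Int)), ("under_35", (lo : Int))]

-- ===== PRECONDITION & SPEC =====
def Spec_over_under (l : List Int) (out : List (String × Int)) : Prop := out = over_under_alt l
instance (l : List Int) (out : List (String × Int)) : Decidable (Spec_over_under l out) := by unfold Spec_over_under; infer_instance

-- ===== CLAIM (what is proved, stated in full; the proofs are below) =====
def Claim_equal_over_under : Prop := ∀ (l : List Int), Dom_over_under l → Spec_over_under l (over_under l)

-- ===== LEMMAS AND PROOFS =====

lemma over_under_loop (l : List Int) (a b : Int) :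
    l.foldl (fun d n =>
      if n > 34 then PySem.Dict.modify d "over_35" 0 (fun v => v + 1)
      else PySem.Dict.modify d "under_35" 0 (fun v => v + 1))
      (PySem.Dict.mk [("over_35", a), ("under_35", b)])
    = PySem.Dict.mk [("over_35", a + ((l.filter (fun n => 34 < n)).length : Int)),
       ("under_35", b + ((l.filter (fun n => n ≤ 34)).length : Int))] := by
  induction l generalizing a b with
  | nil => simp
  | cons x xs ih =>
    by_cases h : x > 34
    · rw [List.foldl_cons, if_pos h,
        show (PySem.Dict.modify (PySem.Dict.mk [("over_35", a), ("under_35", b)]) "over_35" 0 (fun v => v + 1)) = PySem.Dict.mk [("over_35", a + 1), ("under_35", b)] from by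
          simp [PySem.Dict.modify, PySem.Dict.insert, PySem.Dict.getD, PySem.Dict.get?, PySem.Dict.contains],
        ih]
      simp [h]
      ring
    · rw [List.foldl_cons, if_neg h,
        show (PySem.Dict.modify (PySem.Dict.mk [("over_35", a), ("under_35", b)]) "under_35" 0 (fun v => v + 1)) = PySem.Dict.mk [("over_35", a), ("under_35", b + 1)] from by
          simp [PySem.Dict.modify, PySem.Dict.insert, PySem.Dict.getD, PySem.Dict.get?, PySem.Dict.contains],
        ih]
      simp [h, not_lt.mp h]
      ring

lemma over_under_len_split (l : List Int) :
    (l.filter (fun n => 34 < n)).length + (l.filter (fun n => n ≤ 34)).length = l.length := by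
  induction l with
  | nil => simp
  | cons x xs ih =>
    simp only [List.filter_cons, decide_eq_true_eq]
    split_ifs with h1 h2 <;> simp <;> omega

-- the binary search maintains: everything below lo is ≤ 34, everything from hi on is > 34.
lemma ouBis_invariant (s : List Int) (hs : s.Pairwise (· ≤ ·)) :
    ∀ fuel lo hi, hi - lo ≤ fuel → lo ≤ hi → hi ≤ s.length →
    (∀ j (hj : j < s.length), j < lo → s[j] ≤ 34) →
    (∀ j (hj : j < s.length), hi ≤ j → 34 < s[j]) →
    (∀ j (hj : j < s.length), j < ouBis s lo hi → s[j] ≤ 34) ∧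
    (∀ j (hj : j < s.length), ouBis s lo hi ≤ j → 34 < s[j]) ∧
    ouBis s lo hi ≤ s.length := by
  intro fuel
  induction fuel with
  | zero =>
    intro lo hi hf hlh hhl hlow hhigh
    have : lo = hi := by omega
    rw [ouBis, if_neg (by omega)]
    exact ⟨hlow, by subst this; exact hhigh, by omega⟩
  | succ m ih =>
    intro lo hi hf hlh hhl hlow hhigh
    by_cases h : lo < hi
    · have hmid : (lo + hi) / 2 < s.length := by omega
      have hmidlo : lo ≤ (lo + hi) / 2 := by omega
      have hmidhi : (lo + hi) / 2 < hi := by omega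
      have hget : s.getD ((lo + hi) / 2) 0 = s[(lo + hi) / 2] := List.getD_eq_getElem s 0 hmid
      have hpair : ∀ i j (hi' : i < s.length) (hj' : j < s.length), i ≤ j → s[i] ≤ s[j] := by
        intro i j hi' hj' hij
        rcases Nat.lt_or_ge i j with hlt | hge
        · exact (List.pairwise_iff_getElem.mp hs) i j hi' hj' hlt
        · have : i = j := by omega
          subst this; rfl
      rw [ouBis, if_pos h]
      simp only [hget]
      by_cases hv : s[(lo + hi) / 2] > 34
      · rw [if_pos hv]
        exact ih lo ((lo + hi) / 2) (by omega) (by omega) (by omega) hlow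
          (fun j hj hge => lt_of_lt_of_le hv (hpair _ _ hmid hj hge))
      · rw [if_neg hv]
        exact ih ((lo + hi) / 2 + 1) hi (by omega) (by omega) hhl
          (fun j hj hlt => by
            rcases Nat.lt_or_ge j lo with h1 | h1
            · exact hlow j hj h1
            · exact le_trans (hpair _ _ hj hmid (by omega)) (not_lt.mp hv))
          hhigh
    · rw [ouBis, if_neg h]
      have : lo = hi := by omega
      exact ⟨hlow, by subst this; exact hhigh, by omega⟩

-- a partition index characterises the ≤34 filter's length.
lemma filter_le_length_of_partition (s : List Int) (k : Nat) (hk : k ≤ s.length)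
    (hlow : ∀ j (hj : j < s.length), j < k → s[j] ≤ 34)
    (hhigh : ∀ j (hj : j < s.length), k ≤ j → 34 < s[j]) :
    (s.filter (fun n => n ≤ 34)).length = k := by
  have hsplit : s = s.take k ++ s.drop k := (List.take_append_drop k s).symm
  have htake : (s.take k).filter (fun n => n ≤ 34) = s.take k := by
    apply List.filter_eq_self.mpr
    intro a ha
    rcases List.mem_iff_getElem.mp ha with ⟨i, hi, rfl⟩
    have hik : i < k := by have := List.length_take (i := k) (l := s); omega
    have hi' : i < s.length := by
      have := List.length_take (i := k) (l := s); omega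
    rw [List.getElem_take]
    exact decide_eq_true (hlow i hi' hik)
  have hdrop : (s.drop k).filter (fun n => n ≤ 34) = [] := by
    apply List.filter_eq_nil_iff.mpr
    intro a ha
    rcases List.mem_iff_getElem.mp ha with ⟨i, hi, rfl⟩
    have hi' : k + i < s.length := by
      have := List.length_drop (i := k) (l := s); omega
    rw [List.getElem_drop]
    simp only [decide_eq_true_eq, not_le]
    exact hhigh (k + i) hi' (by omega)
  conv_lhs => rw [hsplit]
  rw [List.filter_append, htake, hdrop, List.append_nil, List.length_take]
  omega

-- ===== VERDICT (by name: the statement is the Claim_ definition above) =====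
theorem over_under_spec : Claim_equal_over_under := by
  intro l _
  unfold Spec_over_under over_under over_under_alt
  rw [show (PySem.Dict.insert (PySem.Dict.insert (PySem.Dict.empty : PySem.Dict String Int) "over_35" 0) "under_35" 0) = PySem.Dict.mk [("over_35", 0), ("under_35", 0)] from by decide, over_under_loop l 0 0]
  set s := PySem.List.sorted l (fun x => x) false with hs
  have hperm : s.Perm l := PySem.List.sorted_perm l (fun x => x) false
  have hpw : s.Pairwise (· ≤ ·) := PySem.List.sorted_pairwise l (fun x => x)
  obtain ⟨hlow, hhigh, hle⟩ := ouBis_invariant s hpw s.length 0 s.length (by omega) (by omega) (le_refl _) (by omega) (by intro j hj h; omega)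
  have hk := filter_le_length_of_partition s (ouBis s 0 s.length) hle hlow hhigh
  have hfle : (s.filter (fun n => n ≤ 34)).length = (l.filter (fun n => n ≤ 34)).length :=
    (hperm.filter _).length_eq
  have hfgt : (s.filter (fun n => 34 < n)).length = (l.filter (fun n => 34 < n)).length :=
    (hperm.filter _).length_eq
  have hlen : s.length = l.length := hperm.length_eq
  have hsplit := over_under_len_split s
  
  refine List.ext_getElem (by simp) ?_
  have h1 : ((l.filter (fun n => 34 < n)).length : Int) = (s.length : Int) - (ouBis s 0 s.length : Int) := by
    rw [← hfgt]; omega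
  have h2 : ((l.filter (fun n => n ≤ 34)).length : Int) = (ouBis s 0 s.length : Int) := by
    rw [← hfle, hk]
  simp [h1, h2]
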